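-- pv_equiv track=rewrite | github.com/CrazyMayfly/File-Transfer-Tools | src/ftc.py | alternate_first_last
-- ===== SOURCE A (Python) =====
-- def alternate_first_last(input_list):
--     """
--     Place the first and last elements of input list alternatively
--     """
--     result = []
--     left, right = 0, len(input_list) - 1
--
--     while left <= right:
--         if left == right:  # Handle the middle element when the list has odd length
--             result.append(input_list[left])
--         else:
--             result.append(input_list[left])
--             result.append(input_list[right])
--         left += 1
--         right -= 1
--     return result
-- ===== SOURCE B (Python) =====
-- def alternate_first_last(input_list):
--     """
--     Place the first and last elements of input list alternatively.
--     Split-reverse-merge: pair the front half with the reversed back half.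
--     """
--     n = len(input_list)
--     k = (n + 1) // 2
--     front = input_list[:k]
--     back = input_list[k:][::-1]
--     result = []
--     for f, b in zip(front, back):
--         result += [f, b]
--     if n % 2:
--         result.append(front[-1])
--     return result
-- ===== Notes on version B (the rewrite author's own statement) =====
-- stated objective: alternative
-- what changed: Replaces A's inward two-pointer while-loop with per-step middle handling by a split-reverse-merge: take the front ceil(n/2) elements, reverse the back half, flatten their zip, and append the unpaired middle element when n is odd.
import Mathlib
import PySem

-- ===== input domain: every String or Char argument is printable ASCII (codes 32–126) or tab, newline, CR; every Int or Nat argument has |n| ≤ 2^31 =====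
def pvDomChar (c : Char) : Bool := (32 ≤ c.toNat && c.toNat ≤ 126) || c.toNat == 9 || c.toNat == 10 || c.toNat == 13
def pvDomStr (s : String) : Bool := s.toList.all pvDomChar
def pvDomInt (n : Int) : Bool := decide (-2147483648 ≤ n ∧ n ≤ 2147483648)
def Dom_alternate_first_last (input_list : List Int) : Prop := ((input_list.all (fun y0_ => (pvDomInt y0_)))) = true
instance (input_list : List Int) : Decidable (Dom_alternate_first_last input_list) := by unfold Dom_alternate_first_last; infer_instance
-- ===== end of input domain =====

-- B replaces A's inward two-pointer while-loop by a split-reverse-merge over the two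
-- halves (objective: alternative decomposition, same O(n) cost).

-- ===== PORT A =====
-- the while-loop of A; indices are always in range while the loop runs, so pyGetD's
-- default is never used (Python's IndexError is unreachable here)
def aflLoop (xs : List Int) (left right : Int) (acc : List Int) : List Int :=
  if _h : left ≤ right then
    aflLoop xs (left + 1) (right - 1)
      (if left = right then acc ++ [PySem.List.pyGetD xs left 0]
       else acc ++ [PySem.List.pyGetD xs left 0, PySem.List.pyGetD xs right 0])
  else acc
termination_by (right + 1 - left).toNat
decreasing_by omega

def alternate_first_last (input_list : List Int) : List Int :=
  aflLoop input_list 0 ((input_list.length : Int) - 1) []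

-- ===== PORT B =====
-- input_list[k:][::-1] ported as .reverse, exact by PySem.List.slice?_none_none_neg_one
def alternate_first_last_alt (input_list : List Int) : List Int :=
  let n : Int := input_list.length
  let k : Int := PySem.Int.floordiv (n + 1) 2
  let front := PySem.List.slice input_list none (some k)
  let back := (PySem.List.slice input_list (some k) none).reverse
  let result := (front.zip back).foldl (fun acc fb => acc ++ [fb.1, fb.2]) []
  if PySem.Int.mod n 2 ≠ 0 then result ++ [PySem.List.pyGetD front (-1) 0] else result

-- ===== PRECONDITION & SPEC =====
def Spec_alternate_first_last (input_list : List Int) (out : List Int) : Prop := out = alternate_first_last_alt input_list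
instance (input_list : List Int) (out : List Int) : Decidable (Spec_alternate_first_last input_list out) := by unfold Spec_alternate_first_last; infer_instance

-- ===== CLAIM (what is proved, stated in full; the proofs are below) =====
def Claim_equal_alternate_first_last : Prop := ∀ (input_list : List Int), Dom_alternate_first_last input_list → Spec_alternate_first_last input_list (alternate_first_last input_list)

-- ===== LEMMAS AND PROOFS =====

-- the common characterisation: head, last, then weave the middle
def weave (l : List Int) : List Int :=
  match l with
  | [] => []
  | a :: t => if h : t = [] then [a] else a :: t.getLast h :: weave t.dropLast
termination_by l.length
decreasing_by simp [List.length_dropLast]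

theorem weave_nil : weave [] = [] := by rw [weave.eq_def]

theorem weave_single (a : Int) : weave [a] = [a] := by rw [weave.eq_def]; simp

theorem weave_cons_append (a b : Int) (m : List Int) :
    weave (a :: (m ++ [b])) = a :: b :: weave m := by
  rw [weave.eq_def]
  simp

-- B's pairwise merge as a recursion
def zipflat : List Int → List Int → List Int
  | f :: fs, b :: bs => f :: b :: zipflat fs bs
  | _, _ => []

theorem foldl_zipflat (F B : List Int) (acc : List Int) :
    (F.zip B).foldl (fun acc fb => acc ++ [fb.1, fb.2]) acc = acc ++ zipflat F B := by
  induction F generalizing B acc with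
  | nil => simp [zipflat]
  | cons f fs ih =>
    cases B with
    | nil => simp [zipflat]
    | cons b bs => simp [zipflat, ih]

theorem pyGetD_neg_one_cons (a : Int) (t : List Int) (ht : t ≠ []) :
    PySem.List.pyGetD (a :: t) (-1) 0 = PySem.List.pyGetD t (-1) 0 := by
  rw [PySem.List.pyGetD_neg_one (a :: t) 0 (by simp),
      PySem.List.pyGetD_neg_one t 0 ht, List.getLast_cons ht]

-- B's value as a function of the Nat split point
def bSpec (xs : List Int) : List Int :=
  if xs.length % 2 = 1 then
    zipflat (xs.take ((xs.length + 1) / 2)) ((xs.drop ((xs.length + 1) / 2)).reverse)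
      ++ [PySem.List.pyGetD (xs.take ((xs.length + 1) / 2)) (-1) 0]
  else
    zipflat (xs.take ((xs.length + 1) / 2)) ((xs.drop ((xs.length + 1) / 2)).reverse)

theorem alt_eq_bSpec (xs : List Int) : alternate_first_last_alt xs = bSpec xs := by
  unfold alternate_first_last_alt bSpec
  have hk : PySem.Int.floordiv ((xs.length : Int) + 1) 2 = (((xs.length + 1) / 2 : Nat) : Int) := by
    rw [show ((xs.length : Int) + 1) = ((xs.length + 1 : Nat) : Int) by push_cast; ring]
    exact_mod_cast PySem.Int.floordiv_natCast (xs.length + 1) 2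
  have hmod : PySem.Int.mod (xs.length : Int) 2 = ((xs.length % 2 : Nat) : Int) := by
    exact_mod_cast PySem.Int.mod_natCast xs.length 2
  simp only [hk, hmod, PySem.List.slice_to_natCast, PySem.List.slice_from_natCast,
    foldl_zipflat, List.nil_append]
  by_cases h : xs.length % 2 = 1
  · simp [h]
  · have h0 : xs.length % 2 = 0 := by omega
    simp [h0]

theorem weave_eq_bSpec (xs : List Int) : weave xs = bSpec xs := by
  induction xs using List.bidirectionalRec with
  | nil => simp [weave_nil, bSpec, zipflat]
  | singleton a =>
    rw [weave_single]
    unfold bSpec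
    simp [zipflat, PySem.List.pyGetD_neg_one [a] 0 (by simp)]
  | cons_append a m b ih =>
    rw [weave_cons_append, ih]
    unfold bSpec
    have h1 : (a :: (m ++ [b])).length = m.length + 2 := by simp
    rw [h1]
    have hcm_le : (m.length + 1) / 2 ≤ m.length := by omega
    have hc : (m.length + 2 + 1) / 2 = (m.length + 1) / 2 + 1 := by omega
    rw [hc]
    have htake : (a :: (m ++ [b])).take ((m.length + 1) / 2 + 1) =
        a :: m.take ((m.length + 1) / 2) := by
      simp [List.take_append_of_le_length hcm_le]
    have hdrop : (a :: (m ++ [b])).drop ((m.length + 1) / 2 + 1) =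
        m.drop ((m.length + 1) / 2) ++ [b] := by
      simp [List.drop_append_of_le_length hcm_le]
    rw [htake, hdrop]
    have hpar : (m.length + 2) % 2 = m.length % 2 := by omega
    rw [hpar]
    simp only [List.reverse_append, List.reverse_singleton, List.singleton_append, zipflat]
    by_cases hodd : m.length % 2 = 1
    · have hm : m.take ((m.length + 1) / 2) ≠ [] := by
        apply List.ne_nil_of_length_pos
        rw [List.length_take]
        omega
      rw [if_pos hodd, if_pos hodd, pyGetD_neg_one_cons a _ hm]
      simp
    · rw [if_neg hodd, if_neg hodd]

theorem aflLoop_eq (fuel : Nat) (xs : List Int) (l r : Int) (acc : List Int)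
    (hfuel : (r + 1 - l).toNat ≤ fuel)
    (hl : 0 ≤ l) (hr1 : -1 ≤ r) (hr : r < xs.length) :
    aflLoop xs l r acc = acc ++ weave (PySem.List.slice xs (some l) (some (r + 1))) := by
  induction fuel generalizing l r acc with
  | zero =>
    have hlr : r < l := by omega
    rw [aflLoop, dif_neg (by omega)]
    rw [PySem.List.slice_toNat xs hl (by omega)]
    have : (r + 1).toNat - l.toNat = 0 := by omega
    simp [this, weave_nil]
  | succ fuel ih =>
    by_cases hlr : l ≤ r
    · rw [aflLoop, dif_pos hlr]
      have hlen : 0 < xs.length := by omega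
      have hslice : PySem.List.slice xs (some l) (some (r + 1)) =
          (xs.drop l.toNat).take ((r + 1).toNat - l.toNat) :=
        PySem.List.slice_toNat xs hl (by omega)
      have hgl : PySem.List.pyGetD xs l 0 = xs[l.toNat]'(by omega) :=
        PySem.List.pyGetD_eq_getElem xs 0 hl (by omega)
      by_cases heq : l = r
      · subst heq
        rw [if_pos rfl]
        rw [ih (l + 1) (l - 1) _ (by omega) (by omega) (by omega) (by omega)]
        rw [PySem.List.slice_toNat xs (by omega) (by omega)]
        have h0 : (l - 1 + 1).toNat - (l + 1).toNat = 0 := by omega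
        rw [h0]
        simp only [List.take_zero, weave_nil, List.append_nil]
        rw [hslice]
        have h1 : (l + 1).toNat - l.toNat = 1 := by omega
        rw [h1]
        have hdrop : xs.drop l.toNat = xs[l.toNat]'(by omega) :: xs.drop (l.toNat + 1) :=
          List.drop_eq_getElem_cons (by omega)
        rw [hdrop, List.take_succ_cons, List.take_zero, weave_single, hgl]
      · rw [if_neg heq]
        have hltr : l < r := by omega
        have hgr : PySem.List.pyGetD xs r 0 = xs[r.toNat]'(by omega) :=
          PySem.List.pyGetD_eq_getElem xs 0 (by omega) (by omega)
        rw [ih (l + 1) (r - 1) _ (by omega) (by omega) (by omega) (by omega)]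
        rw [PySem.List.slice_toNat xs (by omega) (by omega)]
        rw [hslice]
        -- decompose the segment: first element, middle, last element
        set A := l.toNat with hA
        set Bn := r.toNat with hB
        have hAB : A < Bn := by omega
        have hBlen : Bn < xs.length := by omega
        have hseg : (xs.drop A).take ((r + 1).toNat - A) =
            xs[A]'(by omega) :: ((xs.drop (A + 1)).take ((r - 1 + 1).toNat - (l + 1).toNat) ++ [xs[Bn]'(hBlen)]) := by
          have h2 : (r + 1).toNat - A = (Bn - A - 1) + 1 + 1 := by omega
          have h3 : (r - 1 + 1).toNat - (l + 1).toNat = Bn - A - 1 := by omega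
          rw [h2, h3]
          rw [List.drop_eq_getElem_cons (by omega : A < xs.length)]
          rw [List.take_succ_cons]
          congr 1
          rw [List.take_add_one]
          congr 1
          have hidx : (A + 1) + (Bn - A - 1) = Bn := by omega
          have hlt : Bn - A - 1 < (xs.drop (A + 1)).length := by simp [List.length_drop]; omega
          rw [List.getElem?_eq_getElem hlt]
          simp [List.getElem_drop, hidx]
        rw [hseg, weave_cons_append, hgl, hgr]
        simp only [List.append_assoc, List.cons_append, List.nil_append]
        rw [show (l + 1).toNat = A + 1 by omega]
    · rw [aflLoop, dif_neg hlr]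
      rw [PySem.List.slice_toNat xs hl (by omega)]
      have : (r + 1).toNat - l.toNat = 0 := by omega
      simp [this, weave_nil]

theorem a_eq_weave (xs : List Int) : alternate_first_last xs = weave xs := by
  unfold alternate_first_last
  cases hxs : xs with
  | nil => rw [aflLoop]; simp [weave_nil]
  | cons y ys =>
    rw [← hxs]
    have hlen : 0 < xs.length := by rw [hxs]; simp
    rw [aflLoop_eq ((xs.length : Int) - 1 + 1 - 0).toNat xs 0 ((xs.length : Int) - 1) []
      (le_refl _) (by omega) (by omega) (by omega)]
    have h1 : (xs.length : Int) - 1 + 1 = (xs.length : Nat) := by omega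
    rw [h1, PySem.List.slice_toNat xs (by omega) (by omega)]
    simp

-- ===== VERDICT (by name: the statement is the Claim_ definition above) =====
theorem alternate_first_last_spec : Claim_equal_alternate_first_last := by
  intro xs _
  unfold Spec_alternate_first_last
  rw [a_eq_weave, alt_eq_bSpec, weave_eq_bSpec]
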